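-- pv_equiv track=rewrite | github.com/RL-DLMU/GAPPO | common/utils_0.py | calculate_first_group
-- ===== SOURCE A (Python) =====
-- def calculate_first_group(groups_list):
--     scheme_list = []
--     scheme_list1 = []
--     num = 0
--     for groups in groups_list:
--         first_sizes = len(groups[0])
--         if first_sizes == num:
--             scheme_list.append(groups)
--         elif first_sizes > num:
--             num = first_sizes
--             scheme_list = [groups]
--     num = 0
--     for groups in scheme_list:
--         first_sizes = len(groups[1])
--         if first_sizes == num:
--             scheme_list1.append(groups)
--         elif first_sizes > num:
--             num = first_sizes
--             scheme_list1 = [groups]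
--     return scheme_list1
-- ===== SOURCE B (Python) =====
-- def calculate_first_group(groups_list):
--     if not groups_list:
--         return []
--     m0 = max(len(g[0]) for g in groups_list)
--     finalists = [g for g in groups_list if len(g[0]) == m0]
--     m1 = max(len(g[1]) for g in finalists)
--     return [g for g in finalists if len(g[1]) == m1]
-- ===== Notes on version B (the rewrite author's own statement) =====
-- stated objective: simpler
-- what changed: Replaces A's two running-max accumulation loops (which rebuild the kept list on each new maximum) by two max-reduces over lengths followed by plain filter passes, computing len(g[1]) only for the finalists exactly as A does.
import Mathlib
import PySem

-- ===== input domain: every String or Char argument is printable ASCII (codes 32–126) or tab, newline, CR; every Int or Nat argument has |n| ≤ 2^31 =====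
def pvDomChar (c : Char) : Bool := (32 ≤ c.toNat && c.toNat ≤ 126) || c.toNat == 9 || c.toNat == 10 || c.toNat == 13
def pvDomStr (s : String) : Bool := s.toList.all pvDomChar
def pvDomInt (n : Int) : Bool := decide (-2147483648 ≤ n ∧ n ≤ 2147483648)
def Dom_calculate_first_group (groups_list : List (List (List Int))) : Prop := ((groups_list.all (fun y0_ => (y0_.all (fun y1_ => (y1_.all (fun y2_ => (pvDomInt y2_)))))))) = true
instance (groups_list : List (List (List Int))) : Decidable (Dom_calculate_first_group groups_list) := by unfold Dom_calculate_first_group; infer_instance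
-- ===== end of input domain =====

-- B replaces A's two running-max accumulation loops by two max-reduces over
-- lengths plus plain filter passes (objective: simpler).

-- ===== PORT A =====
-- One running-max selection pass, shared by A's two identical loops.
-- `groups[i]` is ported as `getD i []`: Pre_ guarantees the index is in range,
-- exactly where Python does not raise IndexError.
def pvStep {α : Type} (key : α → Nat) (s : List α × Nat) (g : α) : List α × Nat :=
  if key g = s.2 then (s.1 ++ [g], s.2)
  else if key g > s.2 then ([g], key g)
  else s

def calculate_first_group (groups_list : List (List (List Int))) : List (List (List Int)) :=
  let s1 := groups_list.foldl (pvStep (fun g => (g.getD 0 []).length)) ([], 0)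
  (s1.1.foldl (pvStep (fun g => (g.getD 1 []).length)) ([], 0)).1

-- ===== PORT B =====
-- Python's max over a nonempty iterable is a left fold of binary max over it;
-- the empty-iterable case (where Python max raises) is the `[]` match arm.
def calculate_first_group_alt (groups_list : List (List (List Int))) : List (List (List Int)) :=
  match groups_list.map (fun g => (g.getD 0 []).length) with
  | [] => []          -- "if not groups_list: return []"
  | x :: xs =>
    let m0 := xs.foldl max x
    let finalists := groups_list.filter (fun g => (g.getD 0 []).length == m0)
    match finalists.map (fun g => (g.getD 1 []).length) with
    | [] => []        -- unreachable: the maximum m0 is attained, so finalists ≠ []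
    | y :: ys =>
      let m1 := ys.foldl max y
      finalists.filter (fun g => (g.getD 1 []).length == m1)

-- ===== PRECONDITION & SPEC =====
-- running maximum of the first-sublist lengths (used only to state Pre_)
def pvMax0 (groups_list : List (List (List Int))) : Nat :=
  groups_list.foldl (fun n g => max n (g.getD 0 []).length) 0

-- Pre_ excludes exactly the inputs where Python A raises IndexError: a group
-- with no sublists (groups[0] in the first loop), or a finalist — a group whose
-- first-sublist length attains the maximum — with fewer than two sublists
-- (groups[1] in the second loop). B raises on exactly the same inputs.
def Pre_calculate_first_group (groups_list : List (List (List Int))) : Prop :=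
  ∀ g ∈ groups_list, 1 ≤ g.length ∧
    ((g.getD 0 []).length = pvMax0 groups_list → 2 ≤ g.length)
instance (groups_list : List (List (List Int))) : Decidable (Pre_calculate_first_group groups_list) := by unfold Pre_calculate_first_group; infer_instance
def pvWitness_calculate_first_group : List (List (List Int)) := [[[1], [2]]]

def Spec_calculate_first_group (groups_list : List (List (List Int))) (out : List (List (List Int))) : Prop := out = calculate_first_group_alt groups_list
instance (groups_list : List (List (List Int))) (out : List (List (List Int))) : Decidable (Spec_calculate_first_group groups_list out) := by unfold Spec_calculate_first_group; infer_instance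

-- ===== CLAIM (what is proved, stated in full; the proofs are below) =====
def Claim_equal_calculate_first_group : Prop := ∀ (groups_list : List (List (List Int))), Dom_calculate_first_group groups_list → Pre_calculate_first_group groups_list → Spec_calculate_first_group groups_list (calculate_first_group groups_list)

-- ===== LEMMAS AND PROOFS =====

-- the running maximum of `key` over `l`, started at `n`
def pvFm {α : Type} (key : α → Nat) (l : List α) (n : Nat) : Nat :=
  l.foldl (fun n g => max n (key g)) n

theorem pvFm_le {α : Type} (key : α → Nat) : ∀ (l : List α) (n : Nat), n ≤ pvFm key l n := by
  intro l
  induction l with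
  | nil => intro n; simp [pvFm]
  | cons g t ih =>
    intro n
    have := ih (max n (key g))
    simp only [pvFm, List.foldl_cons] at *
    omega

theorem pvFm_cases {α : Type} (key : α → Nat) : ∀ (l : List α) (n : Nat), pvFm key l n = n ∨ ∃ a ∈ l, key a = pvFm key l n := by
  intro l
  induction l with
  | nil => intro n; left; simp [pvFm]
  | cons g t ih =>
    intro n
    rcases ih (max n (key g)) with h | ⟨a, ha, hk⟩
    · simp only [pvFm, List.foldl_cons] at *
      by_cases hgn : key g ≤ n
      · left; omega
      · right; exact ⟨g, by simp, by omega⟩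
    · right
      exact ⟨a, by simp [ha], by simpa [pvFm] using hk⟩

-- A's accumulation loop computes the filter by the running maximum.
theorem pvLoopA {α : Type} (key : α → Nat) : ∀ (l : List α) (acc : List α) (n : Nat),
    l.foldl (pvStep key) (acc, n) =
      ((if pvFm key l n = n then acc else []) ++ l.filter (fun g => key g == pvFm key l n),
        pvFm key l n) := by
  intro l
  induction l with
  | nil => intro acc n; simp [pvFm]
  | cons g t ih =>
    intro acc n
    have hle2 : max n (key g) ≤ pvFm key t (max n (key g)) := pvFm_le key t _
    rcases Nat.lt_trichotomy (key g) n with hlt | heq | hgt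
    · have hmax : max n (key g) = n := by omega
      simp only [List.foldl_cons, pvStep, if_neg (by omega : ¬ key g = n),
        if_neg (by omega : ¬ key g > n)]
      rw [ih acc n]
      simp only [pvFm, List.foldl_cons, hmax, List.filter_cons, Prod.mk.injEq] at *
      refine ⟨?_, trivial⟩
      split_ifs <;> simp only [beq_iff_eq] at * <;> first | omega | simp
    · have hmax : max n (key g) = n := by omega
      simp only [List.foldl_cons, pvStep, if_pos heq]
      rw [ih (acc ++ [g]) n]
      simp only [pvFm, List.foldl_cons, hmax, List.filter_cons, Prod.mk.injEq] at *
      refine ⟨?_, trivial⟩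
      split_ifs <;> simp only [beq_iff_eq] at * <;> first | omega | simp
    · have hmax : max n (key g) = key g := by omega
      simp only [List.foldl_cons, pvStep, if_neg (by omega : ¬ key g = n), if_pos hgt]
      rw [ih [g] (key g)]
      simp only [pvFm, List.foldl_cons, hmax, List.filter_cons, Prod.mk.injEq] at *
      refine ⟨?_, trivial⟩
      split_ifs <;> simp only [beq_iff_eq] at * <;> first | omega | simp

-- the maximum over a nonempty list is attained, so the filter is nonempty
theorem pvFilter_max_ne_nil {α : Type} (key : α → Nat) (g0 : α) (t : List α) :
    (g0 :: t).filter (fun g => key g == pvFm key (g0 :: t) 0) ≠ [] := by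
  rcases pvFm_cases key (g0 :: t) 0 with h | ⟨a, ha, hk⟩
  · have hle : key g0 ≤ pvFm key (g0 :: t) 0 := by
      have := pvFm_le key t (max 0 (key g0))
      simp only [pvFm, List.foldl_cons] at *
      omega
    intro hcon
    have := List.filter_eq_nil_iff.mp hcon g0 (by simp)
    simp only [beq_iff_eq] at this
    omega
  · intro hcon
    have := List.filter_eq_nil_iff.mp hcon a ha
    simp [hk] at this

-- B's head-seeded fold over mapped keys equals the 0-seeded running maximum
theorem pvFold_map_eq_pvFm {α : Type} (key : α → Nat) (g0 : α) (t : List α) :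
    (t.map key).foldl max (key g0) = pvFm key (g0 :: t) 0 := by
  simp only [pvFm, List.foldl_cons, List.foldl_map, Nat.zero_max]

-- plain equivalence of the two ports (holds for all inputs of the Lean types)
theorem pv_main : ∀ (gl : List (List (List Int))),
    calculate_first_group gl = calculate_first_group_alt gl := by
  intro gl
  cases gl with
  | nil => rfl
  | cons g0 t0 =>
    set gl := g0 :: t0 with hgl
    set k0 : List (List Int) → Nat := fun g => (g.getD 0 []).length with hk0
    set k1 : List (List Int) → Nat := fun g => (g.getD 1 []).length with hk1
    set M0 : Nat := pvFm k0 gl 0 with hM0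
    have hA1 : gl.foldl (pvStep k0) ([], 0) = (gl.filter (fun g => k0 g == M0), M0) := by
      rw [pvLoopA k0 gl [] 0]; simp [hM0]
    set F0 : List (List (List Int)) := gl.filter (fun g => k0 g == M0) with hF0
    set M1 : Nat := pvFm k1 F0 0 with hM1
    have hA : calculate_first_group gl = F0.filter (fun g => k1 g == M1) := by
      show (((gl.foldl (pvStep k0) ([], 0)).1.foldl (pvStep k1) ([], 0)).1) = _
      rw [hA1]
      rcases hcF0 : F0 with _ | ⟨f0, ft⟩
      · simp [hcF0]
      · rw [← hcF0, pvLoopA k1 F0 [] 0]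
        simp [hM1]
    -- B side
    have hF0ne : F0 ≠ [] := by
      rw [hF0, hgl]
      exact pvFilter_max_ne_nil k0 g0 t0
    rcases hcF0 : F0 with _ | ⟨f0, ft⟩
    · exact absurd hcF0 hF0ne
    have hB : calculate_first_group_alt gl = F0.filter (fun g => k1 g == M1) := by
      show (match gl.map k0 with
            | [] => []
            | x :: xs =>
              let m0 := xs.foldl max x
              let fs := gl.filter (fun g => k0 g == m0)
              match fs.map k1 with
              | [] => []
              | y :: ys => fs.filter (fun g => k1 g == ys.foldl max y)) = _
      have hmap0 : gl.map k0 = k0 g0 :: t0.map k0 := by simp [hgl]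
      rw [hmap0]
      simp only
      rw [pvFold_map_eq_pvFm k0 g0 t0, ← hgl, ← hM0, ← hF0, hcF0]
      simp only [List.map_cons]
      rw [pvFold_map_eq_pvFm k1 f0 ft, ← hcF0, ← hM1]
    rw [hA, hB]

-- ===== VERDICT (by name: the statement is the Claim_ definition above) =====
theorem calculate_first_group_spec : Claim_equal_calculate_first_group := by
  intro gl _ _
  show calculate_first_group gl = calculate_first_group_alt gl
  exact pv_main gl
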